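-- pv_equiv track=rewrite | github.com/Mage212/ccbot | src/ccbot/entities_converter.py | _replace_spoilers_outside_code
-- ===== SOURCE A (Python) =====
-- _SPOILER_OPEN = "<tg-spoiler>"
--
-- _SPOILER_CLOSE = "</tg-spoiler>"
--
-- def _count_backticks(text: str, start: int) -> int:
--     i = start
--     while i < len(text) and text[i] == "`":
--         i += 1
--     return i - start
--
-- def _replace_spoilers_outside_code(text: str) -> str:
--     """Convert ||spoiler|| to <tg-spoiler>spoiler</tg-spoiler> outside code."""
--     out: list[str] = []
--     i = 0
--     line_start = True
--     in_fenced_code = False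
--     inline_delim_len = 0
--     n = len(text)
--
--     while i < n:
--         ch = text[i]
--
--         if line_start and ch == "`":
--             tick_count = _count_backticks(text, i)
--             if tick_count >= 3:
--                 out.append("`" * tick_count)
--                 in_fenced_code = not in_fenced_code
--                 i += tick_count
--                 line_start = False
--                 continue
--
--         if not in_fenced_code and ch == "`":
--             tick_count = _count_backticks(text, i)
--             out.append("`" * tick_count)
--             if inline_delim_len == 0:
--                 inline_delim_len = tick_count
--             elif inline_delim_len == tick_count:
--                 inline_delim_len = 0
--             i += tick_count
--             line_start = False
--             continue
--
--         if (
--             not in_fenced_code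
--             and inline_delim_len == 0
--             and ch == "|"
--             and i + 1 < n
--             and text[i + 1] == "|"
--         ):
--             close = -1
--             j = i + 2
--             while j + 1 < n:
--                 if text[j] == "\n":
--                     break
--                 if text[j] == "|" and text[j + 1] == "|":
--                     close = j
--                     break
--                 j += 1
--             if close != -1 and close > i + 2:
--                 out.append(_SPOILER_OPEN)
--                 out.append(text[i + 2 : close])
--                 out.append(_SPOILER_CLOSE)
--                 i = close + 2
--                 line_start = False
--                 continue
--
--         out.append(ch)
--         i += 1
--         line_start = ch == "\n"
--
--     return "".join(out)
-- ===== SOURCE B (Python) =====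
-- _SPOILER_OPEN = "<tg-spoiler>"
--
-- _SPOILER_CLOSE = "</tg-spoiler>"
--
--
-- def _replace_spoilers_outside_code(text: str) -> str:
--     """Convert ||spoiler|| to <tg-spoiler>spoiler</tg-spoiler> outside code.
--
--     Line-based rewrite: split on '\n' and process each line with a small
--     per-line handler, carrying (in_fenced_code, inline_delim_len) across lines.
--     """
--     out: list[str] = []
--     in_fenced_code = False
--     inline_delim_len = 0
--
--     def scan_line(line: str) -> None:
--         nonlocal inline_delim_len
--         k = 0
--         m = len(line)
--         while k < m:
--             ch = line[k]
--             if ch == "`":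
--                 r = k
--                 while r < m and line[r] == "`":
--                     r += 1
--                 run = r - k
--                 out.append(line[k:r])
--                 if inline_delim_len == 0:
--                     inline_delim_len = run
--                 elif inline_delim_len == run:
--                     inline_delim_len = 0
--                 k = r
--                 continue
--             if inline_delim_len == 0 and ch == "|" and k + 1 < m and line[k + 1] == "|":
--                 close = -1
--                 j = k + 2
--                 while j + 1 < m:
--                     if line[j] == "|" and line[j + 1] == "|":
--                         close = j
--                         break
--                     j += 1
--                 if close > k + 2:
--                     out.append(_SPOILER_OPEN)
--                     out.append(line[k + 2:close])
--                     out.append(_SPOILER_CLOSE)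
--                     k = close + 2
--                     continue
--             out.append(ch)
--             k += 1
--
--     for idx, line in enumerate(text.split("\n")):
--         if idx:
--             out.append("\n")
--         t = 0
--         while t < len(line) and line[t] == "`":
--             t += 1
--         if t >= 3:
--             out.append(line[:t])
--             in_fenced_code = not in_fenced_code
--             if in_fenced_code:
--                 out.append(line[t:])
--             else:
--                 scan_line(line[t:])
--         elif in_fenced_code:
--             out.append(line)
--         else:
--             scan_line(line)
--
--     return "".join(out)
-- ===== Notes on version B (the rewrite author's own statement) =====
-- stated objective: alternative
-- what changed: B splits the text on ' ' and folds per-line handlers (line-start fence toggle / fenced verbatim copy / inline backtick-and-spoiler scanner) over the pieces, carrying (in_fenced_code, inline_delim_len) as explicit cross-line state, instead of A's single character-index loop with a line_start flag and a global position.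
import Mathlib
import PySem

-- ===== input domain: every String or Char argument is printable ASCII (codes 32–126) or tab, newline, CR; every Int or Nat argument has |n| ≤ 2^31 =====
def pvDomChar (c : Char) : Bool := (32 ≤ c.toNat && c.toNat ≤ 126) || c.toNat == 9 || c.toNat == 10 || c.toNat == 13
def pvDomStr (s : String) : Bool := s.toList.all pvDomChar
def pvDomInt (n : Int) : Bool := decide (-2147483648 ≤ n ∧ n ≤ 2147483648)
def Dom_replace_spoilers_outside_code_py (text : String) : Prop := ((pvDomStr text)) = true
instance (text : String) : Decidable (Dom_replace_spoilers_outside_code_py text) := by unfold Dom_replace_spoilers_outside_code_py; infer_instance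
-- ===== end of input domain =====

-- B re-implements the same spoiler conversion by splitting the text on '\n' and folding
-- per-line handlers (fence toggle / fenced verbatim / inline scan) over the lines, carrying
-- (in_fenced_code, inline_delim_len) as explicit state — an alternative decomposition of A's
-- single char-index loop with a line_start flag; same asymptotic cost.

-- ===== PORT A =====
def spoilerOpen : List Char := "<tg-spoiler>".toList
def spoilerClose : List Char := "</tg-spoiler>".toList

-- _count_backticks(text, i) ported on the suffix of the text starting at i
def countBackticks : List Char → Nat
  | '`' :: t => countBackticks t + 1
  | _ => 0

theorem countBackticks_cons_pos (rest : List Char) : 0 < countBackticks ('`' :: rest) := by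
  simp [countBackticks]

-- the `while j + 1 < n` search for the closing "||" (offset from i+2); none = close == -1
def findClose : List Char → Option Nat
  | c1 :: c2 :: rest =>
    if c1 = '\n' then none
    else if c1 = '|' ∧ c2 = '|' then some 0
    else (findClose (c2 :: rest)).map (· + 1)
  | _ => none

-- the main `while i < n` loop of A, on the suffix of the text starting at i
def aLoop (cs : List Char) (lineStart inFence : Bool) (delim : Nat) : List Char :=
  match cs with
  | [] => []
  | ch :: rest =>
    if h1 : lineStart = true ∧ ch = '`' ∧ 3 ≤ countBackticks (ch :: rest) then
      List.replicate (countBackticks (ch :: rest)) '`' ++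
        aLoop ((ch :: rest).drop (countBackticks (ch :: rest))) false (!inFence) delim
    else if h2 : inFence = false ∧ ch = '`' then
      List.replicate (countBackticks (ch :: rest)) '`' ++
        aLoop ((ch :: rest).drop (countBackticks (ch :: rest))) false inFence
          (if delim = 0 then countBackticks (ch :: rest)
           else if delim = countBackticks (ch :: rest) then 0 else delim)
    else if h3 : inFence = false ∧ delim = 0 ∧ ch = '|' ∧ rest.head? = some '|' then
      match findClose (rest.drop 1) with
      | some o =>
        if 0 < o then
          spoilerOpen ++ (rest.drop 1).take o ++ spoilerClose ++
            aLoop ((rest.drop 1).drop (o + 2)) false inFence delim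
        else ch :: aLoop rest (ch = '\n') inFence delim
      | none => ch :: aLoop rest (ch = '\n') inFence delim
    else ch :: aLoop rest (ch = '\n') inFence delim
  termination_by cs.length
  decreasing_by
  all_goals
    simp_all only [List.length_cons, List.length_drop, List.length_append]
  all_goals
    try (have := countBackticks_cons_pos rest)
  all_goals omega

def replace_spoilers_outside_code_py (text : String) : String :=
  String.ofList (aLoop text.toList true false 0)

-- ===== PORT B =====
-- the closing-"||" search of B's scan_line (no '\n' can occur inside a split piece)
def findCloseB : List Char → Option Nat
  | c1 :: c2 :: rest =>
    if c1 = '|' ∧ c2 = '|' then some 0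
    else (findCloseB (c2 :: rest)).map (· + 1)
  | _ => none

-- scan_line: inline backtick runs and spoilers, threading inline_delim_len
def bScan (cs : List Char) (delim : Nat) : List Char × Nat :=
  match cs with
  | [] => ([], delim)
  | c :: rest =>
    if hc : c = '`' then
      let t := countBackticks (c :: rest)
      let p := bScan ((c :: rest).drop t)
        (if delim = 0 then t else if delim = t then 0 else delim)
      ((c :: rest).take t ++ p.1, p.2)
    else if hs : delim = 0 ∧ c = '|' ∧ rest.head? = some '|' then
      match findCloseB (rest.drop 1) with
      | some o =>
        if 0 < o then
          let p := bScan ((rest.drop 1).drop (o + 2)) delim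
          (spoilerOpen ++ (rest.drop 1).take o ++ spoilerClose ++ p.1, p.2)
        else
          let p := bScan rest delim
          (c :: p.1, p.2)
      | none =>
        let p := bScan rest delim
        (c :: p.1, p.2)
    else
      let p := bScan rest delim
      (c :: p.1, p.2)
  termination_by cs.length
  decreasing_by
  all_goals
    simp_all only [List.length_cons, List.length_drop, List.length_append]
  all_goals
    try (subst hc; have := countBackticks_cons_pos rest)
  all_goals omega

-- the body of B's `for idx, line in enumerate(...)` on one line
def bLine (line : List Char) (inFence : Bool) (delim : Nat) : List Char × Bool × Nat :=
  let t := countBackticks line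
  if 3 ≤ t then
    if !inFence then (line.take t ++ line.drop t, !inFence, delim)
    else
      let p := bScan (line.drop t) delim
      (line.take t ++ p.1, !inFence, p.2)
  else if inFence then (line, inFence, delim)
  else
    let p := bScan line delim
    (p.1, inFence, p.2)

-- text.split('\n')
def bSplit : List Char → List (List Char)
  | [] => [[]]
  | c :: t =>
    if c = '\n' then [] :: bSplit t
    else
      match bSplit t with
      | l :: ls => (c :: l) :: ls
      | [] => [[c]]

-- the for-loop over the pieces, emitting '\n' before every piece but the first
def bAll : List (List Char) → Bool → Nat → List Char
  | [], _, _ => []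
  | [l], f, d => (bLine l f d).1
  | l :: l2 :: ls, f, d =>
    (bLine l f d).1 ++ '\n' :: bAll (l2 :: ls) (bLine l f d).2.1 (bLine l f d).2.2

def replace_spoilers_outside_code_py_alt (text : String) : String :=
  String.ofList (bAll (bSplit text.toList) false 0)

-- ===== PRECONDITION & SPEC =====
def Spec_replace_spoilers_outside_code_py (text : String) (out : String) : Prop := out = replace_spoilers_outside_code_py_alt text
instance (text : String) (out : String) : Decidable (Spec_replace_spoilers_outside_code_py text out) := by unfold Spec_replace_spoilers_outside_code_py; infer_instance

-- ===== CLAIM (what is proved, stated in full; the proofs are below) =====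
def Claim_equal_replace_spoilers_outside_code_py : Prop := ∀ (text : String), Dom_replace_spoilers_outside_code_py text → Spec_replace_spoilers_outside_code_py text (replace_spoilers_outside_code_py text)

-- ===== LEMMAS AND PROOFS =====

theorem cb_cons_tick (t : List Char) : countBackticks ('`' :: t) = countBackticks t + 1 := rfl

theorem cb_zero_of_head (tail : List Char) (h : tail.head? ≠ some '`') :
    countBackticks tail = 0 := by
  cases tail with
  | nil => simp [countBackticks]
  | cons c t =>
    rw [countBackticks.eq_def]
    split
    · simp_all
    · rfl

theorem cb_le (cs : List Char) : countBackticks cs ≤ cs.length := by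
  induction cs with
  | nil => simp [countBackticks]
  | cons c t ih =>
    by_cases h : c = '`'
    · subst h; rw [cb_cons_tick]; simpa using ih
    · rw [cb_zero_of_head _ (by simp [h])]
      simp

theorem cb_head (cs : List Char) (h : 0 < countBackticks cs) : cs.head? = some '`' := by
  cases cs with
  | nil => simp [countBackticks] at h
  | cons c t =>
    by_cases hc : c = '`'
    · simp [hc]
    · rw [countBackticks.eq_def] at h
      split at h
      · simp_all
      · omega

theorem cb_append (l tail : List Char) (h : tail.head? ≠ some '`') :
    countBackticks (l ++ tail) = countBackticks l := by
  induction l with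
  | nil => simpa using cb_zero_of_head tail h
  | cons c t ih =>
    by_cases hc : c = '`'
    · subst hc; rw [List.cons_append, cb_cons_tick, cb_cons_tick, ih]
    · rw [List.cons_append, countBackticks.eq_def, countBackticks.eq_def (c :: t)]
      split
      · simp_all
      · split
        · simp_all
        · rfl

theorem take_cb (cs : List Char) :
    cs.take (countBackticks cs) = List.replicate (countBackticks cs) '`' := by
  induction cs with
  | nil => simp [countBackticks]
  | cons c t ih =>
    by_cases hc : c = '`'
    · subst hc
      rw [cb_cons_tick]
      simp [List.replicate_succ, ih]
    · have : countBackticks (c :: t) = 0 := cb_zero_of_head _ (by simp [hc])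
      simp [this]

theorem findClose_nl (xs : List Char) : findClose ('\n' :: xs) = none := by
  cases xs <;> simp [findClose]

theorem findClose_eq : ∀ (mid tail : List Char), '\n' ∉ mid →
    (tail = [] ∨ tail.head? = some '\n') →
    findClose (mid ++ tail) = findCloseB mid
  | [], tail, hm, ht => by
    rcases ht with rfl | ht
    · simp [findClose, findCloseB]
    · cases tail with
      | nil => simp [findClose, findCloseB]
      | cons c t =>
        simp at ht
        subst ht
        simp [findClose_nl, findCloseB]
  | [c], tail, hm, ht => by
    simp at hm
    rcases ht with rfl | ht
    · simp [findClose, findCloseB]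
    · cases tail with
      | nil => simp [findClose, findCloseB]
      | cons c2 t =>
        simp at ht
        subst ht
        rw [List.singleton_append, findClose.eq_def]
        simp only [if_neg hm]
        have : ¬ (c = '|' ∧ '\n' = '|') := by rintro ⟨-, h⟩; simp at h
        rw [if_neg this, findClose_nl]
        simp [findCloseB]
  | c1 :: c2 :: rest, tail, hm, ht => by
    simp at hm
    obtain ⟨h1, h2, hr⟩ := hm
    rw [List.cons_append, List.cons_append, findClose.eq_def, findCloseB.eq_def]
    simp only [if_neg h1]
    by_cases hp : c1 = '|' ∧ c2 = '|'
    · rw [if_pos hp, if_pos hp, if_neg (Ne.symm h1)]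
    · rw [if_neg hp, if_neg hp, if_neg (Ne.symm h1)]
      have := findClose_eq (c2 :: rest) tail (by simp [h2, hr]) ht
      rw [List.cons_append] at this
      rw [this]

theorem findCloseB_bounds : ∀ (xs : List Char) (o : Nat), findCloseB xs = some o → o + 2 ≤ xs.length
  | [], o, h => by simp [findCloseB] at h
  | [c], o, h => by simp [findCloseB] at h
  | c1 :: c2 :: rest, o, h => by
    by_cases hp : c1 = '|' ∧ c2 = '|'
    · simp [findCloseB, hp] at h
      simp only [List.length_cons]
      omega
    · rw [findCloseB.eq_def] at h
      simp only [if_neg hp, Option.map_eq_some_iff] at h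
      obtain ⟨o', h', rfl⟩ := h
      have := findCloseB_bounds (c2 :: rest) o' h'
      simp only [List.length_cons] at this ⊢
      omega

theorem A_newline (rest : List Char) (ls f : Bool) (d : Nat) :
    aLoop ('\n' :: rest) ls f d = '\n' :: aLoop rest true f d := by
  rw [aLoop.eq_def]
  simp only []
  rw [dif_neg (by simp), dif_neg (by simp), dif_neg (by simp)]
  simp

theorem aLoop_ls (cs : List Char) (f : Bool) (d : Nat) (h : countBackticks cs < 3) :
    aLoop cs true f d = aLoop cs false f d := by
  cases cs with
  | nil => rw [aLoop.eq_def, aLoop.eq_def]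
  | cons ch rest =>
    rw [aLoop.eq_def, aLoop.eq_def]
    simp only []
    rw [dif_neg (show ¬(True ∧ ch = '`' ∧ 3 ≤ countBackticks (ch :: rest)) from
          fun hh => absurd hh.2.2 (by omega)),
        dif_neg (show ¬(false = true ∧ ch = '`' ∧ 3 ≤ countBackticks (ch :: rest)) from by simp)]

theorem A_verbatim (l tail : List Char) (d : Nat) (hl : '\n' ∉ l) :
    aLoop (l ++ tail) false true d = l ++ aLoop tail false true d := by
  induction l with
  | nil => simp
  | cons c t ih =>
    simp only [List.mem_cons, not_or] at hl
    rw [List.cons_append, aLoop.eq_def]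
    simp only []
    rw [dif_neg (by simp), dif_neg (by simp), dif_neg (by simp)]
    have hd : (decide (c = '\n')) = false := decide_eq_false (fun hh => hl.1 hh.symm)
    rw [hd, ih (fun hm => hl.2 hm)]
    simp

theorem A_scan : ∀ (l : List Char) (d : Nat) (tail : List Char), '\n' ∉ l →
    (tail = [] ∨ tail.head? = some '\n') →
    aLoop (l ++ tail) false false d = (bScan l d).1 ++ aLoop tail false false (bScan l d).2
  | [], d, tail, hl, ht => by
    rw [bScan.eq_def]
    simp
  | c :: l', d, tail, hl, ht => by
    have hth : tail.head? ≠ some '`' ∧ tail.head? ≠ some '|' := by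
      rcases ht with rfl | ht <;> simp_all
    simp only [List.mem_cons, not_or] at hl
    obtain ⟨hc1, hl'⟩ := hl
    have hd : (decide (c = '\n')) = false := decide_eq_false (fun hh => hc1 hh.symm)
    rw [List.cons_append, aLoop.eq_def, bScan.eq_def]
    simp only []
    rw [dif_neg (show ¬(false = true ∧ c = '`' ∧ 3 ≤ countBackticks (c :: (l' ++ tail))) from by simp)]
    by_cases hbt : c = '`'
    · rw [dif_pos (show _ ∧ _ from ⟨trivial, hbt⟩), dif_pos hbt]
      have hcb : countBackticks (c :: (l' ++ tail)) = countBackticks (c :: l') := by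
        rw [← List.cons_append]; exact cb_append _ _ hth.1
      rw [hcb]
      have hpos : 0 < countBackticks (c :: l') := by
        subst hbt; rw [cb_cons_tick]; omega
      have hle : countBackticks (c :: l') ≤ (c :: l').length := cb_le _
      have hdrop : List.drop (countBackticks (c :: l')) (c :: (l' ++ tail))
          = (c :: l').drop (countBackticks (c :: l')) ++ tail := by
        rw [← List.cons_append]; exact List.drop_append_of_le_length hle
      rw [hdrop]
      rw [A_scan ((c :: l').drop (countBackticks (c :: l')))
            (if d = 0 then countBackticks (c :: l') else if d = countBackticks (c :: l') then 0 else d)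
            tail
            (fun hm => by
              have := List.mem_of_mem_drop hm
              simp only [List.mem_cons] at this
              rcases this with h | h
              · exact hc1 h
              · exact hl' h)
            ht]
      rw [take_cb]
      simp [List.append_assoc]
    · rw [dif_neg (fun hh => hbt hh.2), dif_neg hbt]
      cases l' with
      | nil =>
        rw [dif_neg (by rintro ⟨-, -, -, hh⟩; exact hth.2 (by simpa using hh)), dif_neg (by simp)]
        rw [bScan.eq_def]
        simp [hd]
      | cons c2 l'' =>
        simp only [List.mem_cons, not_or] at hl'
        obtain ⟨hc2, hl''⟩ := hl'
        by_cases hsp : d = 0 ∧ c = '|' ∧ c2 = '|'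
        · rw [dif_pos (show _ ∧ _ ∧ _ ∧ _ from ⟨trivial, hsp.1, hsp.2.1, by simp [hsp.2.2]⟩),
              dif_pos (show _ ∧ _ ∧ _ from ⟨hsp.1, hsp.2.1, by simp [hsp.2.2]⟩)]
          simp only [List.cons_append, List.drop_one, List.tail_cons]
          rw [findClose_eq l'' tail hl'' ht]
          cases hfc : findCloseB l'' with
          | none =>
            simp only [← List.cons_append]
            rw [hd]
            rw [A_scan (c2 :: l'') d tail (by simp_all) ht]
            simp [hd]
          | some o =>
            by_cases ho : 0 < o
            · simp only [if_pos ho]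
              have hb := findCloseB_bounds l'' o hfc
              have htk : List.take o (l'' ++ tail) = List.take o l'' :=
                List.take_append_of_le_length (by omega)
              have hdr : List.drop (o + 2) (l'' ++ tail) = l''.drop (o + 2) ++ tail :=
                List.drop_append_of_le_length (by omega)
              rw [htk, hdr, A_scan (l''.drop (o + 2)) d tail
                    (fun hm => hl'' (List.mem_of_mem_drop hm)) ht]
              simp [List.append_assoc]
            · simp only [if_neg ho]
              simp only [← List.cons_append]
              rw [hd]
              rw [A_scan (c2 :: l'') d tail (by simp_all) ht]
              simp [hd]
        · rw [dif_neg (by rintro ⟨-, h1, h2, h3⟩; simp at h3; exact hsp ⟨h1, h2, h3⟩),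
              dif_neg (by rintro ⟨h1, h2, h3⟩; simp at h3; exact hsp ⟨h1, h2, h3⟩)]
          rw [hd]
          rw [A_scan (c2 :: l'') d tail (by simp_all) ht]
          simp [hd]
  termination_by l => l.length
  decreasing_by all_goals (first | (simp only [List.length_drop, List.length_cons]; omega) | (simp_all only [List.length_drop, List.length_cons]; omega))

theorem A_line (l tail : List Char) (f : Bool) (d : Nat) (hl : '\n' ∉ l)
    (ht : tail = [] ∨ tail.head? = some '\n') :
    aLoop (l ++ tail) true f d =
      (bLine l f d).1 ++ aLoop tail false (bLine l f d).2.1 (bLine l f d).2.2 := by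
  have hth : tail.head? ≠ some '`' := by rcases ht with rfl | ht <;> simp_all
  have hcb : countBackticks (l ++ tail) = countBackticks l := cb_append _ _ hth
  by_cases h3 : 3 ≤ countBackticks l
  · have hpos : 0 < countBackticks l := by omega
    have hhead := cb_head l hpos
    cases l with
    | nil => simp at hhead
    | cons c l' =>
      simp only [List.head?_cons, Option.some.injEq] at hhead
      subst hhead
      rw [List.cons_append, aLoop.eq_def]
      simp only []
      rw [dif_pos (show _ ∧ _ ∧ _ from ⟨trivial, trivial, by rw [← List.cons_append, hcb]; exact h3⟩)]
      rw [show ('`' :: (l' ++ tail)) = ('`' :: l') ++ tail from rfl, hcb]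
      have hle := cb_le ('`' :: l')
      rw [List.drop_append_of_le_length hle]
      simp only [bLine]
      rw [if_pos h3]
      cases f with
      | false =>
        simp only [Bool.not_false, if_pos rfl]
        rw [A_verbatim _ tail d (fun hm => hl (List.mem_of_mem_drop hm))]
        rw [take_cb]
        simp [List.append_assoc]
      | true =>
        simp only [Bool.not_true]
        rw [if_neg (by simp)]
        rw [A_scan (('`' :: l').drop (countBackticks ('`' :: l'))) d tail
              (fun hm => hl (List.mem_of_mem_drop hm)) ht]
        rw [take_cb]
        simp [List.append_assoc]
  · have hlt : countBackticks (l ++ tail) < 3 := by omega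
    rw [aLoop_ls _ f d hlt]
    simp only [bLine]
    rw [if_neg h3]
    cases f with
    | true =>
      rw [if_pos rfl]
      exact A_verbatim l tail d hl
    | false =>
      rw [if_neg (by simp)]
      exact A_scan l d tail hl ht

theorem bSplit_no_nl (l : List Char) (hl : '\n' ∉ l) : bSplit l = [l] := by
  induction l with
  | nil => rfl
  | cons c t ih =>
    simp only [List.mem_cons, not_or] at hl
    rw [bSplit.eq_def]
    simp only []
    rw [if_neg (fun h => hl.1 h.symm), ih hl.2]

theorem bSplit_cons (l rest : List Char) (hl : '\n' ∉ l) :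
    bSplit (l ++ '\n' :: rest) = l :: bSplit rest := by
  induction l with
  | nil =>
    rw [List.nil_append, bSplit.eq_def]
    simp
  | cons c t ih =>
    simp only [List.mem_cons, not_or] at hl
    rw [List.cons_append, bSplit.eq_def]
    simp only []
    rw [if_neg (fun h => hl.1 h.symm), ih hl.2]

theorem bSplit_ne_nil (cs : List Char) : bSplit cs ≠ [] := by
  cases cs with
  | nil => simp [bSplit]
  | cons c t =>
    rw [bSplit.eq_def]
    simp only []
    split
    · simp
    · split <;> simp_all

theorem main_eq : ∀ (cs : List Char) (f : Bool) (d : Nat),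
    aLoop cs true f d = bAll (bSplit cs) f d
  | cs, f, d => by
    by_cases hn : '\n' ∈ cs
    · have hdw : cs.dropWhile (fun c => c ≠ '\n') ≠ [] := by
        intro hemp
        have : cs.takeWhile (fun c => c ≠ '\n') = cs := by
          conv_rhs => rw [← List.takeWhile_append_dropWhile (p := fun c => c ≠ '\n') (l := cs)]
          rw [hemp, List.append_nil]
        have := List.mem_takeWhile_imp (l := cs) (p := fun c => c ≠ '\n') (by rw [this]; exact hn)
        simp at this
      obtain ⟨c0, rest, hdw2⟩ : ∃ c0 rest, cs.dropWhile (fun c => c ≠ '\n') = c0 :: rest := by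
        cases hh : cs.dropWhile (fun c => c ≠ '\n') with
        | nil => exact absurd hh hdw
        | cons a b => exact ⟨a, b, rfl⟩
      have hc0 : c0 = '\n' := by
        have := List.head_dropWhile_not (p := fun c => decide (c ≠ '\n')) (l := cs)
          (by rw [hdw2]; simp)
        revert this
        generalize hx : List.dropWhile (fun c => decide (c ≠ '\n')) cs = xs at *
        subst hdw2
        simp_all
      subst hc0
      have hdecomp : cs = cs.takeWhile (fun c => c ≠ '\n') ++ '\n' :: rest := by
        conv_lhs => rw [← List.takeWhile_append_dropWhile (p := fun c => c ≠ '\n') (l := cs)]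
        rw [hdw2]
      have htw : '\n' ∉ cs.takeWhile (fun c => c ≠ '\n') := by
        intro hm
        have := List.mem_takeWhile_imp hm
        simp at this
      have hlen : rest.length < cs.length := by
        conv_rhs => rw [hdecomp]
        simp only [List.length_append, List.length_cons]
        omega
      rw [hdecomp, bSplit_cons _ rest htw,
          A_line (cs.takeWhile (fun c => c ≠ '\n')) ('\n' :: rest) f d htw (Or.inr rfl),
          A_newline, main_eq rest]
      cases hsp : bSplit rest with
      | nil => exact absurd hsp (bSplit_ne_nil rest)
      | cons p ps => rw [bAll]
    · rw [bSplit_no_nl cs hn]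
      have := A_line cs [] f d hn (Or.inl rfl)
      rw [List.append_nil] at this
      rw [this, bAll]
      simp [aLoop]
  termination_by cs => cs.length

-- ===== VERDICT (by name: the statement is the Claim_ definition above) =====
theorem replace_spoilers_outside_code_py_spec : Claim_equal_replace_spoilers_outside_code_py := by
  intro text _
  unfold Spec_replace_spoilers_outside_code_py replace_spoilers_outside_code_py replace_spoilers_outside_code_py_alt
  rw [main_eq]
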